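-- pv_equiv track=rewrite | github.com/ev-25889/astroCalc | astrocalc/main/convert.py | get_num_of_birthday
-- ===== SOURCE A (Python) =====
-- def get_num_of_birthday(birthday):
--     summa = 0
--     for i in range(len(birthday)):
--         if birthday[i] in '123456789':
--             summa += int(birthday[i])
--     while summa > 22:
--         summa -= 22
--     return summa
-- ===== SOURCE B (Python) =====
-- def get_num_of_birthday(birthday):
--     summa = sum(int(c) for c in birthday if c in '123456789')
--     return 0 if summa == 0 else (summa - 1) % 22 + 1
-- ===== Notes on version B (the rewrite author's own statement) =====
-- stated objective: simpler
-- what changed: The index loop and the repeated subtract-22 reduction loop are replaced by a filtered generator-sum over the characters followed by a single closed-form modular reduction (0 if the sum is 0, else (sum - 1) % 22 + 1).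
import Mathlib
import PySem

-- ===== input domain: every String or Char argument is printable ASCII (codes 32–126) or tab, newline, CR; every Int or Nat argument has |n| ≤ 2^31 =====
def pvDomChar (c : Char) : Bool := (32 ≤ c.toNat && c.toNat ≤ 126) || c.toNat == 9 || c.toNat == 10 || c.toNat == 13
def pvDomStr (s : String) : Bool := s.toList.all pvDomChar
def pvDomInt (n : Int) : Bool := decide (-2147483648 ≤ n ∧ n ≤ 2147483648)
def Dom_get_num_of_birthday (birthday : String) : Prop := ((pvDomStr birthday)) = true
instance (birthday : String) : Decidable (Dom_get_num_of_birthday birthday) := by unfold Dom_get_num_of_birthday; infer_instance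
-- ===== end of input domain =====

-- B replaces the index loop and the repeated 22-subtraction loop by a filtered sum and one closed-form modular reduction (simpler).


-- ===== PORT A =====
-- the 'while summa > 22: summa -= 22' loop
def pvReduceA (s : Int) : Int :=
  if 22 < s then pvReduceA (s - 22) else s
termination_by s.toNat
decreasing_by omega

-- 'c in "123456789"' is Python substring membership of the 1-char string;
-- int(c) for a guaranteed single digit char is exactly (c.toNat : Int) - 48.
def get_num_of_birthday (birthday : String) : Int :=
  let cs := birthday.toList
  let summa := (PySem.List.pyRange 0 (PySem.Str.len birthday) 1).foldl
    (fun summa j =>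
      let c := PySem.List.pyGetD cs j ' '
      if PySem.Chars.isIn [c] ['1','2','3','4','5','6','7','8','9'] then
        summa + ((c.toNat : Int) - 48)
      else summa) 0
  pvReduceA summa

-- ===== PORT B =====
def get_num_of_birthday_alt (birthday : String) : Int :=
  let summa := ((birthday.toList.filter
      (fun c => PySem.Chars.isIn [c] ['1','2','3','4','5','6','7','8','9'])).map
      (fun c => ((c.toNat : Int) - 48))).sum
  if summa = 0 then 0 else PySem.Int.mod (summa - 1) 22 + 1

-- ===== PRECONDITION & SPEC =====
def Spec_get_num_of_birthday (birthday : String) (out : Int) : Prop := out = get_num_of_birthday_alt birthday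
instance (birthday : String) (out : Int) : Decidable (Spec_get_num_of_birthday birthday out) := by unfold Spec_get_num_of_birthday; infer_instance

-- ===== CLAIM (what is proved, stated in full; the proofs are below) =====
def Claim_equal_get_num_of_birthday : Prop := ∀ (birthday : String), Dom_get_num_of_birthday birthday → Spec_get_num_of_birthday birthday (get_num_of_birthday birthday)

-- ===== LEMMAS AND PROOFS =====

-- A's accumulation loop computes B's filtered sum.
lemma foldl_if_eq_filter_sum (cs : List Char) (a : Int) :
    cs.foldl
      (fun summa c =>
        if PySem.Chars.isIn [c] ['1','2','3','4','5','6','7','8','9'] then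
          summa + ((c.toNat : Int) - 48)
        else summa) a
    = a + ((cs.filter
        (fun c => PySem.Chars.isIn [c] ['1','2','3','4','5','6','7','8','9'])).map
        (fun c => ((c.toNat : Int) - 48))).sum := by
  induction cs generalizing a with
  | nil => simp
  | cons c cs ih =>
    simp only [List.foldl_cons, List.filter_cons]
    by_cases h : PySem.Chars.isIn [c] ['1','2','3','4','5','6','7','8','9'] = true
    · simp [h, ih]; ring
    · simp [h, ih]

lemma digit_ge_one {c : Char}
    (h : PySem.Chars.isIn [c] ['1','2','3','4','5','6','7','8','9'] = true) :
    1 ≤ ((c.toNat : Int) - 48) := by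
  have hm : c ∈ ['1','2','3','4','5','6','7','8','9'] := by
    have := (PySem.Chars.isIn_iff_infix (sub := [c])
      (s := ['1','2','3','4','5','6','7','8','9'])).mp h
    exact this.subset (by simp)
  fin_cases hm <;> decide

lemma sum_nonneg_digits (cs : List Char) :
    0 ≤ ((cs.filter
        (fun c => PySem.Chars.isIn [c] ['1','2','3','4','5','6','7','8','9'])).map
        (fun c => ((c.toNat : Int) - 48))).sum := by
  induction cs with
  | nil => simp
  | cons c cs ih =>
    simp only [List.filter_cons]
    by_cases h : PySem.Chars.isIn [c] ['1','2','3','4','5','6','7','8','9'] = true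
    · have := digit_ge_one h
      simp [h]; omega
    · simp [h, ih]

-- the subtraction loop is the closed-form reduction
lemma reduceA_closed : ∀ (n : Nat) (s : Int), s.toNat = n → 0 ≤ s →
    pvReduceA s = if s = 0 then 0 else (s - 1) % 22 + 1 := by
  intro n
  induction n using Nat.strong_induction_on with
  | _ n ih =>
    intro s hn hs
    rw [pvReduceA]
    by_cases h : 22 < s
    · have hrec := ih (s - 22).toNat (by omega) (s - 22) rfl (by omega)
      rw [if_pos h, hrec]
      by_cases hz : s - 22 = 0
      · simp [hz]; omega
      · rw [if_neg hz, if_neg (by omega)]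
        omega
    · rw [if_neg h]
      by_cases hz : s = 0
      · simp [hz]
      · rw [if_neg hz]
        omega

-- ===== VERDICT (by name: the statement is the Claim_ definition above) =====
theorem get_num_of_birthday_spec : Claim_equal_get_num_of_birthday := by
  intro birthday _
  unfold Spec_get_num_of_birthday get_num_of_birthday get_num_of_birthday_alt
  simp only [PySem.Str.len_eq]
  rw [PySem.List.foldl_pyRange_zero_pyGetD' birthday.toList ' '
      (fun summa c =>
        if PySem.Chars.isIn [c] ['1','2','3','4','5','6','7','8','9'] then
          summa + ((c.toNat : Int) - 48)
        else summa) 0]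
  rw [foldl_if_eq_filter_sum]
  set S := ((birthday.toList.filter
      (fun c => PySem.Chars.isIn [c] ['1','2','3','4','5','6','7','8','9'])).map
      (fun c => ((c.toNat : Int) - 48))).sum with hS
  have hpos : 0 ≤ S := sum_nonneg_digits _
  rw [zero_add, reduceA_closed S.toNat S rfl hpos,
      PySem.Int.mod_eq_emod_of_pos (by norm_num)]
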